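-- pv_equiv track=rewrite | github.com/victorabarros/hackerrank_challenges | reverse_matrix.py | reverse_column
-- ===== SOURCE A (Python) =====
-- def reverse_column(matrix, idx):
--     original_column = list()
--     for line in matrix:
--         original_column.append(line[idx])
--     original_column.reverse()
--
--     result = list()
--     for ii, line in enumerate(matrix):
--         result.append(line.copy())
--         result[ii][idx] = original_column[ii]
--
--     return result
-- ===== SOURCE B (Python) =====
-- def reverse_column(matrix, idx):
--     n = len(matrix)
--     result = []
--     for i, row in enumerate(matrix):
--         new_row = row.copy()
--         new_row[idx] = matrix[n - 1 - i][idx]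
--         result.append(new_row)
--     return result
-- ===== Notes on version B (the rewrite author's own statement) =====
-- stated objective: simpler
-- what changed: B drops A's separate column-extraction list and its reverse() pass: a single enumerate loop copies each row and overwrites the column cell with the mirror row's value matrix[n-1-i][idx] read directly via index mirroring.
import Mathlib
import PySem

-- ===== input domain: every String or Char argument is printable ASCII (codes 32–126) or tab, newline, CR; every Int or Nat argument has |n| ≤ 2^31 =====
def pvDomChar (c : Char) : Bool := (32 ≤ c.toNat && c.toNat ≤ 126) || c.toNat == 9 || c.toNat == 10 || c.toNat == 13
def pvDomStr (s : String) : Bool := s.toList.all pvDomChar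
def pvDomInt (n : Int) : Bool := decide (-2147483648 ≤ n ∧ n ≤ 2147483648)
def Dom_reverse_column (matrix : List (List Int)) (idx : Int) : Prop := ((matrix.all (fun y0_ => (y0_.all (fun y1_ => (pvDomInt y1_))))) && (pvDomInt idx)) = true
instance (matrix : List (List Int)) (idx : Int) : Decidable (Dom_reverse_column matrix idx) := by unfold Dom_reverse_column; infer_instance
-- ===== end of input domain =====

-- B replaces A's extract-column-then-reverse two-pass scheme by one enumerate pass that
-- copies each row and reads the mirror row's column cell directly (objective: simpler).

-- ===== PORT A =====
def reverse_column (matrix : List (List Int)) (idx : Int) : List (List Int) :=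
  let original_column :=
    (matrix.foldl (fun acc line => acc ++ [PySem.List.pyGetD line idx 0]) []).reverse
  (PySem.List.enumerate matrix 0).foldl
    (fun result p =>
      let result := result ++ [p.2]
      PySem.List.pySetD result p.1
        (PySem.List.pySetD (PySem.List.pyGetD result p.1 []) idx
          (PySem.List.pyGetD original_column p.1 0)))
    []

-- ===== PORT B =====
def reverse_column_alt (matrix : List (List Int)) (idx : Int) : List (List Int) :=
  let n : Int := matrix.length
  (PySem.List.enumerate matrix 0).foldl
    (fun result p =>
      result ++ [PySem.List.pySetD p.2 idx
        (PySem.List.pyGetD (PySem.List.pyGetD matrix (n - 1 - p.1) []) idx 0)])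
    []

-- ===== PRECONDITION & SPEC =====
-- Pre_ excludes exactly the inputs where the Python A raises IndexError: idx must be a
-- valid Python index into every row.
def Pre_reverse_column (matrix : List (List Int)) (idx : Int) : Prop :=
  ∀ line ∈ matrix, PySem.Raise.InRange line.length idx
instance (matrix : List (List Int)) (idx : Int) : Decidable (Pre_reverse_column matrix idx) := by unfold Pre_reverse_column; infer_instance

def pvWitness_reverse_column : List (List Int) × Int := ([[1, 2], [3, 4], [5, 6]], 1)

def Spec_reverse_column (matrix : List (List Int)) (idx : Int) (out : List (List Int)) : Prop := out = reverse_column_alt matrix idx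
instance (matrix : List (List Int)) (idx : Int) (out : List (List Int)) : Decidable (Spec_reverse_column matrix idx out) := by unfold Spec_reverse_column; infer_instance

-- ===== CLAIM (what is proved, stated in full; the proofs are below) =====
def Claim_equal_reverse_column : Prop := ∀ (matrix : List (List Int)) (idx : Int), Dom_reverse_column matrix idx → Pre_reverse_column matrix idx → Spec_reverse_column matrix idx (reverse_column matrix idx)

-- ===== LEMMAS AND PROOFS =====

-- A's second loop: append a row, then overwrite the just-appended row at position ii.
-- With acc.length = s, this is exactly "append the modified row".
theorem foldA_eq_map (idx : Int) (v : Int → Int) :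
    ∀ (l : List (List Int)) (s : Nat) (acc : List (List Int)), acc.length = s →
      (PySem.List.enumerate l (s : Int)).foldl
        (fun result p =>
          let result := result ++ [p.2]
          PySem.List.pySetD result p.1
            (PySem.List.pySetD (PySem.List.pyGetD result p.1 []) idx (v p.1)))
        acc
      = acc ++ (PySem.List.enumerate l (s : Int)).map
          (fun p => PySem.List.pySetD p.2 idx (v p.1)) := by
  intro l
  induction l with
  | nil => intro s acc h; simp [PySem.List.enumerate_nil]
  | cons x xs ih =>
    intro s acc h
    rw [PySem.List.enumerate_cons]
    simp only [List.foldl_cons, List.map_cons]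
    have hget : PySem.List.pyGetD (acc ++ [x]) (s : Int) [] = x := by
      rw [PySem.List.pyGetD_natCast]
      simp [← h, List.getD]
    have hset : ∀ y : List Int, PySem.List.pySetD (acc ++ [x]) (s : Int) y = acc ++ [y] := by
      intro y
      rw [PySem.List.pySetD_natCast]
      rw [List.set_append_right _ _ (by omega)]
      simp [← h]
    simp only [hget, hset]
    have : ((s : Int) + 1) = ((s + 1 : Nat) : Int) := by push_cast; ring
    rw [this, ih (s + 1) (acc ++ [PySem.List.pySetD x idx (v s)]) (by simp [h])]
    simp

-- column values agree: A reads the reversed extracted column, B reads the mirror row.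
theorem col_value_eq (matrix : List (List Int)) (idx : Int) (k : Nat) (hk : k < matrix.length) :
    PySem.List.pyGetD ((matrix.map (fun line => PySem.List.pyGetD line idx 0)).reverse) (k : Int) 0
    = PySem.List.pyGetD
        (PySem.List.pyGetD matrix ((matrix.length : Int) - 1 - (k : Nat)) []) idx 0 := by
  have hmirror : ((matrix.length : Int) - 1 - (k : Nat)) = ((matrix.length - 1 - k : Nat) : Int) := by
    omega
  rw [hmirror, PySem.List.pyGetD_natCast, PySem.List.pyGetD_natCast]
  have h1 : matrix.length - 1 - k < matrix.length := by omega
  have h2 : k < (matrix.map (fun line => PySem.List.pyGetD line idx 0)).reverse.length := by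
    simpa using hk
  rw [List.getD_eq_getElem _ _ h2, List.getD_eq_getElem _ _ (by simpa using h1)]
  simp only [List.getElem_reverse, List.getElem_map, List.length_map]

-- ===== VERDICT (by name: the statement is the Claim_ definition above) =====
theorem reverse_column_spec : Claim_equal_reverse_column := by
  intro matrix idx _hdom _hpre
  unfold Spec_reverse_column reverse_column reverse_column_alt
  have hA := foldA_eq_map idx
    (fun i => PySem.List.pyGetD
      ((matrix.foldl (fun acc line => acc ++ [PySem.List.pyGetD line idx 0]) []).reverse) i 0)
    matrix 0 [] rfl
  simp only [Int.natCast_zero, List.nil_append] at hA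
  rw [hA, PySem.List.foldl_append_singleton_eq_map,
    PySem.List.foldl_append_singleton_eq_map]
  simp only [List.nil_append]
  apply List.map_congr_left
  intro p hp
  rcases (PySem.List.mem_enumerate_iff _ _ _).1 hp with ⟨k, hk, rfl⟩
  simp only [Int.zero_add]
  rw [col_value_eq matrix idx k hk]
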